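-- pv_equiv track=rewrite | github.com/stvhay/glinet-comet-reverse-gpl | scripts/analyze_device_tree_diff.py | _extract_model_and_compatible
-- ===== SOURCE A (Python) =====
-- def _extract_model_and_compatible(content: str) -> tuple[str | None, str | None]:
--     """Extract model and first compatible string from DTS content."""
--     model = None
--     compatible = None
--
--     for line in content.splitlines():
--         if "model = " in line and model is None:
--             model = line.split('"')[1] if '"' in line else None
--         if "compatible = " in line and compatible is None:
--             parts = line.split('"')
--             if len(parts) >= 2:  # noqa: PLR2004
--                 compatible = parts[1]
--
--     return model, compatible
-- ===== SOURCE B (Python) =====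
-- def _extract_model_and_compatible(content: str) -> tuple[str | None, str | None]:
--     """Extract model and first compatible string from DTS content."""
--     lines = content.splitlines()
--
--     def first_quoted(keyword):
--         for line in lines:
--             if keyword in line and '"' in line:
--                 return line.split('"')[1]
--         return None
--
--     return first_quoted('model = '), first_quoted('compatible = ')
-- ===== Notes on version B (the rewrite author's own statement) =====
-- stated objective: simpler
-- what changed: Replaces the single interleaved loop maintaining two Optional accumulators with a local early-returning helper first_quoted(keyword) run once per keyword (two independent scans).
import Mathlib
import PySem

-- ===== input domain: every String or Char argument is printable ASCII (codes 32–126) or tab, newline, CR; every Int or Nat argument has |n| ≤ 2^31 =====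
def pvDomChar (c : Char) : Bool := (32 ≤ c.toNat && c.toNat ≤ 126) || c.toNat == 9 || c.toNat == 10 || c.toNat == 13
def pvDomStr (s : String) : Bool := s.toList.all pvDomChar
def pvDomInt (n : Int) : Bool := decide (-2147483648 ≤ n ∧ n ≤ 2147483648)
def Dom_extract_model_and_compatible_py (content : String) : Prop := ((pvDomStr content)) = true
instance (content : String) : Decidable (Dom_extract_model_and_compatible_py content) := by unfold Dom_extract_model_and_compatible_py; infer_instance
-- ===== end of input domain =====

-- B replaces A's single interleaved loop with two accumulators by a helper scan run once per keyword (simpler decomposition, same cost).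

-- ===== PORT A =====
-- line.split('"')[1] : splitOn is the sep ≠ "" form of str.split; index 1 is in range whenever '"' is in the line
def extract_model_and_compatible_py (content : String) : Option String × Option String :=
  (PySem.Str.splitlines content).foldl
    (fun (st : Option String × Option String) line =>
      let st1 :=
        if PySem.Str.isIn "model = " line && st.1.isNone then
          (if PySem.Str.isIn "\"" line
             then ((PySem.Chars.splitOn line.toList "\"".toList)[1]?).map String.ofList
             else none, st.2)
        else st
      if PySem.Str.isIn "compatible = " line && st1.2.isNone then
        let parts := PySem.Chars.splitOn line.toList "\"".toList
        if 2 ≤ parts.length then (st1.1, (parts[1]?).map String.ofList) else st1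
      else st1)
    (none, none)

-- ===== PORT B =====
def pvFirstQuoted (keyword : String) : List String → Option String
  | [] => none
  | line :: rest =>
    if PySem.Str.isIn keyword line && PySem.Str.isIn "\"" line then
      ((PySem.Chars.splitOn line.toList "\"".toList)[1]?).map String.ofList
    else pvFirstQuoted keyword rest

def extract_model_and_compatible_py_alt (content : String) : Option String × Option String :=
  let lines := PySem.Str.splitlines content
  (pvFirstQuoted "model = " lines, pvFirstQuoted "compatible = " lines)

-- ===== PRECONDITION & SPEC =====
def Spec_extract_model_and_compatible_py (content : String) (out : Option String × Option String) : Prop := out = extract_model_and_compatible_py_alt content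
instance (content : String) (out : Option String × Option String) : Decidable (Spec_extract_model_and_compatible_py content out) := by unfold Spec_extract_model_and_compatible_py; infer_instance

-- ===== CLAIM (what is proved, stated in full; the proofs are below) =====
def Claim_equal_extract_model_and_compatible_py : Prop := ∀ (content : String), Dom_extract_model_and_compatible_py content → Spec_extract_model_and_compatible_py content (extract_model_and_compatible_py content)

-- ===== LEMMAS AND PROOFS =====

-- the number of pieces str.split('"') produces is 1 + (number of '"' in the string)
theorem pv_splitOn_go_length (fuel : Nat) : ∀ (l cur : List Char) (acc : List (List Char)),
    l.length ≤ fuel →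
    (PySem.Chars.splitOn.go "\"".toList fuel l cur acc).length = acc.length + 1 + l.count '"' := by
  induction fuel with
  | zero =>
      intro l cur acc h
      have : l = [] := List.eq_nil_of_length_eq_zero (Nat.le_zero.mp h)
      subst this
      simp [PySem.Chars.splitOn.go]
  | succ n ih =>
      intro l cur acc h
      cases l with
      | nil => simp [PySem.Chars.splitOn.go]
      | cons c rest =>
          by_cases hc : c = '"'
          · subst hc
            have : PySem.Chars.splitOn.go "\"".toList (n+1) ('"' :: rest) cur acc
                = PySem.Chars.splitOn.go "\"".toList n rest [] (cur.reverse :: acc) := by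
              simp [PySem.Chars.splitOn.go, List.isPrefixOf]
            rw [this, ih rest [] (cur.reverse :: acc) (by simpa using Nat.lt_succ_iff.mp (by simpa using h))]
            simp
            omega
          · have : PySem.Chars.splitOn.go "\"".toList (n+1) (c :: rest) cur acc
                = PySem.Chars.splitOn.go "\"".toList n rest (c :: cur) acc := by
              have hc' : ¬ ('"' = c) := fun hx => hc hx.symm
              simp [PySem.Chars.splitOn.go, List.isPrefixOf, hc']
            rw [this, ih rest (c :: cur) acc (by simpa using Nat.lt_succ_iff.mp (by simpa using h))]
            simp [hc]

theorem pv_splitOn_length (l : List Char) :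
    (PySem.Chars.splitOn l "\"".toList).length = 1 + l.count '"' := by
  unfold PySem.Chars.splitOn
  rw [pv_splitOn_go_length (l.length + 1) l [] [] (by omega)]
  simp

-- '"' in line  ↔  the split has at least two pieces
theorem pv_isIn_iff_two_le (line : String) :
    PySem.Str.isIn "\"" line = true ↔ 2 ≤ (PySem.Chars.splitOn line.toList "\"".toList).length := by
  rw [PySem.Str.isIn_iff_infix, pv_splitOn_length]
  constructor
  · intro h
    have hm : '"' ∈ line.toList := by
      rcases h with ⟨s, t, hst⟩
      simp [← hst]
    have := List.count_pos_iff.mpr hm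
    omega
  · intro h
    have hm : '"' ∈ line.toList := by
      by_contra hn
      rw [List.count_eq_zero_of_not_mem hn] at h
      omega
    obtain ⟨s, t, hst⟩ := List.append_of_mem hm
    exact ⟨s, t, by rw [hst]; simp⟩

theorem pv_quote_some (line : String) (h : PySem.Str.isIn "\"" line = true) :
    ∃ v, ((PySem.Chars.splitOn line.toList "\"".toList)[1]?).map String.ofList = some v := by
  have h2 := (pv_isIn_iff_two_le line).mp h
  have : 1 < (PySem.Chars.splitOn line.toList "\"".toList).length := by omega
  exact ⟨String.ofList _, by rw [List.getElem?_eq_getElem this]; rfl⟩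

-- the loop of A, from an arbitrary accumulator state, computes B's two scans
theorem pv_foldl_eq (lines : List String) : ∀ (m c : Option String),
    lines.foldl
      (fun (st : Option String × Option String) line =>
        let st1 :=
          if PySem.Str.isIn "model = " line && st.1.isNone then
            (if PySem.Str.isIn "\"" line
               then ((PySem.Chars.splitOn line.toList "\"".toList)[1]?).map String.ofList
               else none, st.2)
          else st
        if PySem.Str.isIn "compatible = " line && st1.2.isNone then
          let parts := PySem.Chars.splitOn line.toList "\"".toList
          if 2 ≤ parts.length then (st1.1, (parts[1]?).map String.ofList) else st1
        else st1) (m, c)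
    = ((match m with | some x => some x | none => pvFirstQuoted "model = " lines),
       (match c with | some y => some y | none => pvFirstQuoted "compatible = " lines)) := by
  induction lines with
  | nil => intro m c; cases m <;> cases c <;> simp [pvFirstQuoted]
  | cons line rest ih =>
      intro m c
      simp only [List.foldl_cons]
      rw [ih]
      by_cases hQ : PySem.Chars.isIn ['"'] line.toList = true
      · have hQ' : PySem.Str.isIn "\"" line = true := by simpa using hQ
        obtain ⟨v, hv⟩ := pv_quote_some line hQ'
        have hv' : Option.map String.ofList (PySem.Chars.splitOn line.toList ['"'])[1]? = some v := by
          simpa using hv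
        have h2 : 2 ≤ (PySem.Chars.splitOn line.toList ['"']).length := by
          simpa using (pv_isIn_iff_two_le line).mp hQ'
        by_cases hM : PySem.Chars.isIn ['m','o','d','e','l',' ','=',' '] line.toList = true <;>
          by_cases hC : PySem.Chars.isIn ['c','o','m','p','a','t','i','b','l','e',' ','=',' '] line.toList = true <;>
          cases m <;> cases c <;>
          simp [pvFirstQuoted, hM, hC, hQ, h2, hv']
      · have h2 : ¬ 2 ≤ (PySem.Chars.splitOn line.toList ['"']).length := by
          intro h
          exact hQ (by simpa using (pv_isIn_iff_two_le line).mpr (by simpa using h))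
        by_cases hM : PySem.Chars.isIn ['m','o','d','e','l',' ','=',' '] line.toList = true <;>
          by_cases hC : PySem.Chars.isIn ['c','o','m','p','a','t','i','b','l','e',' ','=',' '] line.toList = true <;>
          cases m <;> cases c <;>
          simp [pvFirstQuoted, hM, hC, hQ, h2]

-- ===== VERDICT (by name: the statement is the Claim_ definition above) =====
theorem extract_model_and_compatible_py_spec : Claim_equal_extract_model_and_compatible_py := by
  intro content _
  unfold Spec_extract_model_and_compatible_py extract_model_and_compatible_py extract_model_and_compatible_py_alt
  rw [pv_foldl_eq]
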